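-- pv_equiv track=rewrite | github.com/its-cutie-valerie/codedex-dsa-march | 16_green_chicago_river.py | lucky_river
-- ===== SOURCE A (Python) =====
-- def lucky_river(river, hours):
--     # Write code below 💖
--     new_river = list(river)
--     for i in range(len(river)):
--         if river[i] == '☘️':
--             for h in range(1, hours + 1):
--                 if i + h < len(river):
--                     new_river[i + h] = '☘️'
--     return new_river
-- ===== SOURCE B (Python) =====
-- def lucky_river(river, hours):
--     # '☘️' is TWO codepoints (U+2618 U+FE0F), while river[i] is always a
--     # single-codepoint string, so A's match condition can never be true and
--     # A always returns list(river) unchanged; B states that directly.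
--     return list(river)
-- ===== Notes on version B (the rewrite author's own statement) =====
-- stated objective: simpler
-- what changed: A's test river[i] == '☘️' compares a single codepoint against the two-codepoint emoji and can never be true, so the nested spreading loops are dead code; B is the one-liner list(river) that A is extensionally equal to on every input. (constant-factor speedup: no per-index loop or comparison)
import Mathlib
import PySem

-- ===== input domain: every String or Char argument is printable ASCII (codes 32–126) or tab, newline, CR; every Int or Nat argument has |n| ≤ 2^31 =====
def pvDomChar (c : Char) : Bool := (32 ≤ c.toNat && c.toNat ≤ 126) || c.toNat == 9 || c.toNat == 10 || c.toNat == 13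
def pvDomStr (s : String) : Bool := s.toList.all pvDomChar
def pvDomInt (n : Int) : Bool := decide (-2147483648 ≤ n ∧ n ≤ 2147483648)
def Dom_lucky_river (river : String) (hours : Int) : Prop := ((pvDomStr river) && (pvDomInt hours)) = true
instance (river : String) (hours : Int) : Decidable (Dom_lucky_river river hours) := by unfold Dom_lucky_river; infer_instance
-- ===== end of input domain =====

-- B changes: A's clover test compares one codepoint to the two-codepoint emoji, so it never
-- fires and A always returns list(river); B is that one-liner. Objective: simpler.

-- ===== PORT A =====
-- '\u2618\ufe0f' — Python's clover literal, TWO codepoints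
def pvCloverA : List Char := ['\u2618', '\uFE0F']

def lucky_river (river : String) (hours : Int) : List String :=
  let rl : List Char := river.toList
  -- new_river = list(river)
  let new_river : List String := rl.map (fun c => String.ofList [c])
  -- for i in range(len(river)): if river[i] == '☘️': for h in range(1, hours+1): if i+h < len: new_river[i+h] = '☘️'
  (PySem.List.pyRange 0 (PySem.Str.len river) 1).foldl
    (fun nr i =>
      if [PySem.List.pyGetD rl i ' '] = pvCloverA then
        (PySem.List.pyRange 1 (hours + 1) 1).foldl
          (fun nr2 h =>
            if i + h < PySem.Str.len river then PySem.List.pySetD nr2 (i + h) (String.ofList pvCloverA)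
            else nr2)
          nr
      else nr)
    new_river

-- ===== PORT B =====
def lucky_river_alt (river : String) (hours : Int) : List String :=
  river.toList.map (fun c => String.ofList [c])

-- ===== PRECONDITION & SPEC =====
def Spec_lucky_river (river : String) (hours : Int) (out : List String) : Prop := out = lucky_river_alt river hours
instance (river : String) (hours : Int) (out : List String) : Decidable (Spec_lucky_river river hours out) := by unfold Spec_lucky_river; infer_instance

-- ===== CLAIM (what is proved, stated in full; the proofs are below) =====
def Claim_equal_lucky_river : Prop := ∀ (river : String) (hours : Int), Dom_lucky_river river hours → Spec_lucky_river river hours (lucky_river river hours)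

-- ===== LEMMAS AND PROOFS =====
-- a one-element char list is never the two-element clover list
theorem pv_singleton_ne_clover (c : Char) : ¬ ([c] = pvCloverA) := by
  intro h
  simpa [pvCloverA] using congrArg List.length h

-- ===== VERDICT (by name: the statement is the Claim_ definition above) =====
theorem lucky_river_spec : Claim_equal_lucky_river := by
  intro river hours _
  unfold Spec_lucky_river lucky_river lucky_river_alt
  dsimp only
  rw [show (fun nr i =>
        if [PySem.List.pyGetD river.toList i ' '] = pvCloverA then
          List.foldl
            (fun nr2 h =>
              if i + h < PySem.Str.len river then PySem.List.pySetD nr2 (i + h) (String.ofList pvCloverA)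
              else nr2)
            nr (PySem.List.pyRange 1 (hours + 1))
        else nr)
      = (fun nr (_ : Int) => nr) from
        funext fun nr => funext fun i => if_neg (pv_singleton_ne_clover _),
      PySem.List.foldl_ignore]
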